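-- pv_equiv track=rewrite | github.com/injusticescorpio/Python_Competitve_Programs | Dynamic programming/beautiful.py | check_beautiful
-- ===== SOURCE A (Python) =====
-- def check_beautiful(n):
--     li=tuple(int(i) for i in str(n))
--     d={}
--     for i in li:
--         if i not in d:
--             d[i]=1
--         else:
--             d[i]+=1
--     for i,j in d.items():
--         if i!=j:
--             return False
--     return True
-- ===== SOURCE B (Python) =====
-- def check_beautiful(n):
--     s = sorted(str(n))
--     i = 0
--     while i < len(s):
--         j = i
--         while j < len(s) and s[j] == s[i]:
--             j += 1
--         if j - i != int(s[i]):
--             return False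
--         i = j
--     return True
-- ===== Notes on version B (the rewrite author's own statement) =====
-- stated objective: alternative
-- what changed: Replaces A's frequency-dictionary build plus items scan by sort-then-scan: sort the digit string and check each maximal run of equal digits has length equal to that digit's value.
import Mathlib
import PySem

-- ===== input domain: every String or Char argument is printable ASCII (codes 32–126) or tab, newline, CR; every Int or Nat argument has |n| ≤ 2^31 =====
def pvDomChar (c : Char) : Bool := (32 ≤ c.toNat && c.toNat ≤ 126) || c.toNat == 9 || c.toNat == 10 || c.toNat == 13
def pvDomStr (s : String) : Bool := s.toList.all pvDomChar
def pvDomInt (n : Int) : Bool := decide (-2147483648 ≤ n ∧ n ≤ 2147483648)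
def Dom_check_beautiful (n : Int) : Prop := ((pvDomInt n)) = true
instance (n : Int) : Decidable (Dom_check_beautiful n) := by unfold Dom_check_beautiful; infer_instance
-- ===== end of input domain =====

-- B replaces A's frequency-dictionary build + items scan by sort-then-scan: sort the digits and
-- check each maximal run of equal digits has length equal to the digit's value (objective: alternative).

-- ===== PORT A =====
-- int(i) for a single character: PySem.Int.ofChars? [c]; Pre_ (0 ≤ n) keeps every character a digit, so it is never none.
def check_beautiful (n : Int) : Bool :=
  let li : List Int := (PySem.Int.toChars n).map (fun c => (PySem.Int.ofChars? [c]).getD 0)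
  let d : PySem.Dict Int Int :=
    li.foldl (fun d i => if !(d.contains i) then d.insert i 1 else d.modify i 0 (· + 1)) PySem.Dict.empty
  -- 'for i,j in d.items(): if i != j: return False' then 'return True'
  d.items.all (fun p => p.1 == p.2)

-- ===== PORT B =====
-- the outer while loop of Source B; the inner 'while j < len(s) and s[j] == s[i]: j += 1'
-- is the takeWhile/dropWhile split of the tail at position i
def pvRun (s : List Char) : Bool :=
  match s with
  | [] => true
  | c :: rest =>
      if (((rest.takeWhile (· == c)).length + 1 : Int)) ≠ (PySem.Int.ofChars? [c]).getD 0 then false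
      else pvRun (rest.dropWhile (· == c))
termination_by s.length
decreasing_by
  simp only [List.length_cons]
  exact Nat.lt_succ_of_le (List.dropWhile_sublist _ |>.length_le)

def check_beautiful_alt (n : Int) : Bool :=
  pvRun (PySem.List.sorted (PySem.Int.toChars n) (fun c => c) false)

-- ===== PRECONDITION & SPEC =====
-- Pre_ excludes negative n, where Python's int applied to the minus sign makes both A and B raise ValueError.
def Pre_check_beautiful (n : Int) : Prop := 0 ≤ n
instance (n : Int) : Decidable (Pre_check_beautiful n) := by unfold Pre_check_beautiful; infer_instance
def pvWitness_check_beautiful : Int := (122)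
def Spec_check_beautiful (n : Int) (out : Bool) : Prop := out = check_beautiful_alt n
instance (n : Int) (out : Bool) : Decidable (Spec_check_beautiful n out) := by unfold Spec_check_beautiful; infer_instance

-- ===== CLAIM (what is proved, stated in full; the proofs are below) =====
def Claim_equal_check_beautiful : Prop := ∀ (n : Int), Dom_check_beautiful n → Pre_check_beautiful n → Spec_check_beautiful n (check_beautiful n)

-- ===== LEMMAS AND PROOFS =====

-- every character produced by Nat.toDigits 10 is some digitChar d, d < 10
def pvIsDig (c : Char) : Prop := ∃ d, d < 10 ∧ c = Nat.digitChar d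

theorem pvToDigitsCoreDig : ∀ (fuel n : Nat) (ds : List Char), (∀ c ∈ ds, pvIsDig c) →
    ∀ c ∈ Nat.toDigitsCore 10 fuel n ds, pvIsDig c := by
  intro fuel
  induction fuel with
  | zero => intro n ds h; simpa [Nat.toDigitsCore] using h
  | succ f ih =>
    intro n ds h c hc
    have hd : ∀ c' ∈ (n % 10).digitChar :: ds, pvIsDig c' := by
      intro c' hc'
      rcases List.mem_cons.mp hc' with h1 | h1
      · exact ⟨n % 10, Nat.mod_lt _ (by omega), h1⟩
      · exact h c' h1
    by_cases hz : n / 10 = 0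
    · have : Nat.toDigitsCore 10 (f + 1) n ds = (n % 10).digitChar :: ds := by
        simp [Nat.toDigitsCore, hz]
      exact hd c (this ▸ hc)
    · have : Nat.toDigitsCore 10 (f + 1) n ds = Nat.toDigitsCore 10 f (n / 10) ((n % 10).digitChar :: ds) := by
        simp [Nat.toDigitsCore, hz]
      exact ih (n / 10) _ hd c (this ▸ hc)

theorem pvToCharsDig (n : Int) (hn : 0 ≤ n) : ∀ c ∈ PySem.Int.toChars n, pvIsDig c := by
  have : PySem.Int.toChars n = Nat.toDigits 10 n.toNat := by
    simp [PySem.Int.toChars]; omega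
  rw [this, Nat.toDigits]
  exact pvToDigitsCoreDig _ _ [] (by simp)

-- the value int(c) of a digit character, and injectivity of c ↦ int(c) on digit characters
theorem pvValDigitChar : ∀ d < 10, (PySem.Int.ofChars? [Nat.digitChar d]).getD 0 = (d : Int) := by decide

theorem pvValInj {a b : Char} (ha : pvIsDig a) (hb : pvIsDig b)
    (h : (PySem.Int.ofChars? [a]).getD 0 = (PySem.Int.ofChars? [b]).getD 0) : a = b := by
  obtain ⟨da, hda, rfl⟩ := ha
  obtain ⟨db, hdb, rfl⟩ := hb
  rw [pvValDigitChar da hda, pvValDigitChar db hdb] at h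
  have : da = db := by exact_mod_cast h
  rw [this]

-- A's update loop is collections.Counter
theorem pvFoldCounter (li : List Int) :
    li.foldl (fun d i => if !(d.contains i) then d.insert i 1 else d.modify i 0 (· + 1)) PySem.Dict.empty
      = PySem.Dict.counter li := by
  rw [PySem.Dict.counter_eq_foldl]
  apply PySem.List.foldl_congr_mem
  intro d x _
  by_cases hc : d.contains x = true
  · simp [hc, PySem.Dict.modify]
  · simp only [Bool.not_eq_true] at hc
    simp [hc, PySem.Dict.modify, PySem.Dict.getD_of_not_contains _ _ hc]

-- on a ≤-sorted list every element of the tail after the first run is strictly above the head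
theorem pvAfterRun {c : Char} {rest : List Char} (hp : (c :: rest).Pairwise (· ≤ ·)) :
    ∀ x ∈ rest.dropWhile (· == c), c < x := by
  intro x hx
  obtain ⟨hhead, hrest⟩ := List.pairwise_cons.mp hp
  have hxrest : x ∈ rest := (List.dropWhile_sublist _).subset hx
  have hcx : c ≤ x := hhead x hxrest
  refine lt_of_le_of_ne hcx ?_
  cases hd : rest.dropWhile (· == c) with
  | nil => rw [hd] at hx; simp at hx
  | cons d0 tl =>
    have hd0 : (d0 == c) = false := by
      have := List.head_dropWhile_not (· == c) (l := rest) (by simp [hd])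
      simpa [hd] using this
    have hd0c : d0 ≠ c := by simpa using hd0
    have hd0rest : d0 ∈ rest := (List.dropWhile_sublist _).subset (by rw [hd]; exact List.mem_cons_self ..)
    have hcd0 : c < d0 := lt_of_le_of_ne (hhead d0 hd0rest) (Ne.symm hd0c)
    rw [hd] at hx
    rcases List.mem_cons.mp hx with rfl | hxtl
    · exact Ne.symm hd0c
    · have hp' : (rest.dropWhile (· == c)).Pairwise (· ≤ ·) :=
        hrest.sublist (List.dropWhile_sublist _)
      rw [hd] at hp'
      have hdx : d0 ≤ x := (List.pairwise_cons.mp hp').1 x hxtl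
      exact ne_of_lt (lt_of_lt_of_le hcd0 hdx)

-- the first element's count in a ≤-sorted list is its initial run length
theorem pvCountHead {c : Char} {rest : List Char} (hp : (c :: rest).Pairwise (· ≤ ·)) :
    (c :: rest).count c = (rest.takeWhile (· == c)).length + 1 := by
  have hsplit : rest.takeWhile (· == c) ++ rest.dropWhile (· == c) = rest :=
    List.takeWhile_append_dropWhile
  have htake : (rest.takeWhile (· == c)).count c = (rest.takeWhile (· == c)).length :=
    List.count_eq_length.mpr (fun b hb => by
      have hbc := List.mem_takeWhile_imp hb
      exact (eq_of_beq hbc).symm)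
  have hdrop : (rest.dropWhile (· == c)).count c = 0 :=
    List.count_eq_zero.mpr (fun hm => absurd rfl (ne_of_gt (pvAfterRun hp c hm)))
  calc (c :: rest).count c = rest.count c + 1 := List.count_cons_self
    _ = ((rest.takeWhile (· == c)) ++ (rest.dropWhile (· == c))).count c + 1 := by rw [hsplit]
    _ = (rest.takeWhile (· == c)).length + 1 := by rw [List.count_append, htake, hdrop]

-- counts of later elements are unchanged by stripping the first run
theorem pvCountTail {c x : Char} {rest : List Char} (hp : (c :: rest).Pairwise (· ≤ ·))
    (hx : x ∈ rest.dropWhile (· == c)) :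
    (c :: rest).count x = (rest.dropWhile (· == c)).count x := by
  have hcx : c < x := pvAfterRun hp x hx
  have hsplit : rest.takeWhile (· == c) ++ rest.dropWhile (· == c) = rest :=
    List.takeWhile_append_dropWhile
  have htake : (rest.takeWhile (· == c)).count x = 0 :=
    List.count_eq_zero.mpr (fun hm => by
      have := List.mem_takeWhile_imp hm
      exact (ne_of_lt hcx) (eq_of_beq this).symm)
  calc (c :: rest).count x = rest.count x := List.count_cons_of_ne (ne_of_lt hcx)
    _ = ((rest.takeWhile (· == c)) ++ (rest.dropWhile (· == c))).count x := by rw [hsplit]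
    _ = (rest.dropWhile (· == c)).count x := by rw [List.count_append, htake]; omega

-- On a ≤-sorted list, pvRun accepts iff every element's count equals its int value
theorem pvRunCheck : ∀ (t : List Char), t.Pairwise (· ≤ ·) →
    (pvRun t = true ↔ ∀ c ∈ t, ((t.count c : Int) = (PySem.Int.ofChars? [c]).getD 0)) := by
  intro t
  induction t using pvRun.induct with
  | case1 => intro _; simp [pvRun]
  | case2 c rest hne =>
    intro hp
    rw [pvRun]
    rw [if_pos hne]
    simp only [Bool.false_eq_true, false_iff, not_forall]
    refine ⟨c, ⟨by simp, ?_⟩⟩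
    rw [pvCountHead hp]
    push_cast
    exact hne
  | case3 c rest hne ih =>
    intro hp
    obtain ⟨hhead, hrest⟩ := List.pairwise_cons.mp hp
    have hpd : (rest.dropWhile (· == c)).Pairwise (· ≤ ·) :=
      hrest.sublist (List.dropWhile_sublist _)
    have heq : ((rest.takeWhile (· == c)).length + 1 : Int) = (PySem.Int.ofChars? [c]).getD 0 := by
      omega
    rw [pvRun, if_neg hne, ih hpd]
    constructor
    · intro hall x hxmem
      rcases List.mem_cons.mp hxmem with rfl | hxrest
      · rw [pvCountHead hp]; push_cast; exact_mod_cast heq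
      · rcases (by
            rw [← List.takeWhile_append_dropWhile (p := (· == c)) (l := rest)] at hxrest
            exact List.mem_append.mp hxrest) with hxt | hxd
        · have : x = c := by simpa using List.mem_takeWhile_imp hxt
          subst this
          rw [pvCountHead hp]; push_cast; exact_mod_cast heq
        · rw [pvCountTail hp hxd]
          exact hall x hxd
    · intro hall x hxd
      rw [← pvCountTail hp hxd]
      exact hall x (List.mem_cons_of_mem _ ((List.dropWhile_sublist _).subset hxd))

-- ===== VERDICT (by name: the statement is the Claim_ definition above) =====
theorem check_beautiful_spec : Claim_equal_check_beautiful := by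
  intro n _ hpre
  unfold Spec_check_beautiful check_beautiful check_beautiful_alt
  set f : Char → Int := fun c => (PySem.Int.ofChars? [c]).getD 0 with hf
  set cs : List Char := PySem.Int.toChars n with hcs
  have hdig : ∀ c ∈ cs, pvIsDig c := pvToCharsDig n hpre
  set t : List Char := PySem.List.sorted cs (fun c => c) false with ht
  have hperm : t.Perm cs := PySem.List.sorted_perm cs (fun c => c) false
  have hpw : t.Pairwise (· ≤ ·) := PySem.List.sorted_pairwise cs (fun c => c)
  rw [Bool.eq_iff_iff]
  simp only []
  rw [pvFoldCounter, PySem.Dict.items_counter, pvRunCheck t hpw]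
  simp only [List.all_map, List.all_eq_true, Function.comp_def, beq_iff_eq]
  constructor
  · -- A accepts → every element of t has count = value
    intro hA x hxt
    have hxcs : x ∈ cs := hperm.subset hxt
    have hxm : f x ∈ PySem.Set.ofList (cs.map f) :=
      (PySem.Set.mem_ofList _ _).mpr (List.mem_map.mpr ⟨x, hxcs, rfl⟩)
    have h1 : f x = ((cs.map f).count (f x) : Int) := hA (f x) hxm
    have h2 : (cs.map f).count (f x) = cs.count x := by
      rw [List.count, List.countP_map, List.count]
      apply List.countP_congr
      intro a ha
      simp only [Function.comp_def, beq_iff_eq]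
      constructor
      · intro haeq; exact pvValInj (hdig a ha) (hdig x hxcs) haeq
      · intro haeq; rw [haeq]
    rw [hperm.count_eq x, ← h2, ← h1]
  · -- every element of t has count = value → A accepts
    intro hB k hk
    have hk' : k ∈ cs.map f := (PySem.Set.mem_ofList _ _).mp hk
    obtain ⟨x, hxcs, rfl⟩ := List.mem_map.mp hk'
    have hxt : x ∈ t := hperm.mem_iff.mpr hxcs
    have h1 : (t.count x : Int) = f x := hB x hxt
    have h2 : (cs.map f).count (f x) = cs.count x := by
      rw [List.count, List.countP_map, List.count]
      apply List.countP_congr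
      intro a ha
      simp only [Function.comp_def, beq_iff_eq]
      constructor
      · intro haeq; exact pvValInj (hdig a ha) (hdig x hxcs) haeq
      · intro haeq; rw [haeq]
    rw [h2, ← hperm.count_eq x, h1]
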